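-- pv_equiv track=rewrite | github.com/AdamSeidman/SDAQ | Python/lib/tools.py | apply_rollover_fix
-- ===== SOURCE A (Python) =====
-- def apply_rollover_fix(data, c=75):
--     if len(data) <= 2:
--         return data
--     lastVal = data[0]
--     for i in range(1, len(data)):
--         ndiff = abs(lastVal - (data[i] - 255))
--         diff = abs(lastVal - data[i])
--         pdiff = abs(lastVal - (data[i] + 255))
--         dmin = min(ndiff, diff, pdiff)
--         if abs(dmin - diff) > c:
--             if ndiff == dmin:
--                 for n in range(i, len(data)):
--                     data[n] -= 255
--             elif pdiff == dmin:
--                 for n in range(i, len(data)):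
--                     data[n] += 255
--         lastVal = data[i]
--     return data
-- ===== SOURCE B (Python) =====
-- def apply_rollover_fix(data, c=75):
--     # One pass carrying a cumulative offset instead of reshifting the whole tail in place.
--     if len(data) <= 2:
--         return data
--     out = [data[0]]
--     off = 0
--     last = data[0]
--     for x in data[1:]:
--         v = x + off
--         ndiff = abs(last - (v - 255))
--         diff = abs(last - v)
--         pdiff = abs(last - (v + 255))
--         dmin = min(ndiff, diff, pdiff)
--         if abs(dmin - diff) > c:
--             if ndiff == dmin:
--                 off -= 255
--             elif pdiff == dmin:
--                 off += 255
--         v = x + off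
--         out.append(v)
--         last = v
--     return out
-- ===== Notes on version B (the rewrite author's own statement) =====
-- stated objective: alternative
-- what changed: Instead of reshifting every trailing element by 255 each time a rollover is detected (nested loop mutating the list in place), B makes a single pass that carries a cumulative offset applied to each element as it is read and builds a fresh output list.
import Mathlib
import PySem

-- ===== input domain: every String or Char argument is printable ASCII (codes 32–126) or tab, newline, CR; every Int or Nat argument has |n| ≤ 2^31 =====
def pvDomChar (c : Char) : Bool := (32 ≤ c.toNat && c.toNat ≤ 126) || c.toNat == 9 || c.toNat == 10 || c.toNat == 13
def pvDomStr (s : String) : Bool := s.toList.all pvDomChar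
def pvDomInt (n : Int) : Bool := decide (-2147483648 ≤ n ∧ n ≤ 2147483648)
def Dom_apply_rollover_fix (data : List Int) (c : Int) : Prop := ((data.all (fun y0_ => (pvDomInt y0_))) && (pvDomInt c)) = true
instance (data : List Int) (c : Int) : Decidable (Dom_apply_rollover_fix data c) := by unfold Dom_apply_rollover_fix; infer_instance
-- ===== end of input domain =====

-- B replaces A's reshifting of the whole tail at every detected rollover by a single pass that
-- carries a cumulative offset (objective: alternative). A mutates its argument in place and returns
-- it; B builds a fresh list — the equivalence proved here is about the RETURN value only.

-- ===== PORT A =====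
-- the inner 'for n in range(i, len(data)): data[n] += δ' loop (δ = -255 or +255)
def aShift (data : List Int) (i : Nat) (d : Int) : List Int :=
  data.take i ++ (data.drop i).map (fun v => v + d)

-- one iteration of A's outer loop body: the possibly-reshifted data
def aStep (data : List Int) (lastVal c : Int) (i : Nat) : List Int :=
  let di := data.getD i 0
  let ndiff := |lastVal - (di - 255)|
  let diff := |lastVal - di|
  let pdiff := |lastVal - (di + 255)|
  let dmin := min ndiff (min diff pdiff)
  if |dmin - diff| > c then
    if ndiff = dmin then aShift data i (-255)
    else if pdiff = dmin then aShift data i 255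
    else data
  else data

theorem aStep_length (data : List Int) (lastVal c : Int) (i : Nat) :
    (aStep data lastVal c i).length = data.length := by
  simp only [aStep, aShift]
  split_ifs <;> simp <;> omega

-- A's outer loop 'for i in range(1, len(data))', state = (data, lastVal)
def aLoop (data : List Int) (lastVal c : Int) (i : Nat) : List Int :=
  if i < data.length then
    let data' := aStep data lastVal c i
    aLoop data' (data'.getD i 0) c (i + 1)
  else data
termination_by data.length - i
decreasing_by simp only [aStep_length]; omega

def apply_rollover_fix (data : List Int) (c : Int) : List Int :=
  if data.length ≤ 2 then data
  else aLoop data (data.getD 0 0) c 1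

-- ===== PORT B =====
def bLoop (xs : List Int) (off last c : Int) : List Int :=
  match xs with
  | [] => []
  | x :: rest =>
    let v := x + off
    let ndiff := |last - (v - 255)|
    let diff := |last - v|
    let pdiff := |last - (v + 255)|
    let dmin := min ndiff (min diff pdiff)
    let off' := if |dmin - diff| > c then
        if ndiff = dmin then off - 255
        else if pdiff = dmin then off + 255
        else off
      else off
    (x + off') :: bLoop rest off' (x + off') c

def apply_rollover_fix_alt (data : List Int) (c : Int) : List Int :=
  if data.length ≤ 2 then data
  else
    match data with
    | [] => []
    | x :: rest => x :: bLoop rest 0 x c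

-- ===== PRECONDITION & SPEC =====
def Spec_apply_rollover_fix (data : List Int) (c : Int) (out : List Int) : Prop := out = apply_rollover_fix_alt data c
instance (data : List Int) (c : Int) (out : List Int) : Decidable (Spec_apply_rollover_fix data c out) := by unfold Spec_apply_rollover_fix; infer_instance

-- ===== CLAIM (what is proved, stated in full; the proofs are below) =====
def Claim_equal_apply_rollover_fix : Prop := ∀ (data : List Int) (c : Int), Dom_apply_rollover_fix data c → Spec_apply_rollover_fix data c (apply_rollover_fix data c)

-- ===== LEMMAS AND PROOFS =====

theorem getD_append_cons (pre l : List Int) (a : Int) :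
    (pre ++ a :: l).getD pre.length 0 = a := by
  simp

theorem aShift_append_cons (pre ys : List Int) (y d : Int) :
    aShift (pre ++ y :: ys) pre.length d = pre ++ (y + d) :: ys.map (fun v => v + d) := by
  simp [aShift]

-- loop invariant: A's mutated list is the processed prefix ++ original tail shifted by B's offset
theorem aLoop_eq_bLoop (suf : List Int) : ∀ (pre : List Int) (off last c : Int),
    aLoop (pre ++ suf.map (fun v => v + off)) last c pre.length
      = pre ++ bLoop suf off last c := by
  induction suf with
  | nil => intro pre off last c; rw [aLoop]; simp [bLoop]
  | cons x rest ih =>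
    intro pre off last c
    rw [aLoop]
    have hlt : pre.length < (pre ++ (x :: rest).map (fun v => v + off)).length := by
      simp
    rw [if_pos hlt]
    have hget : (pre ++ (x :: rest).map (fun v => v + off)).getD pre.length 0 = x + off := by
      simp only [List.map_cons]; exact getD_append_cons pre (rest.map (fun v => v + off)) (x + off)
    show aLoop (aStep _ last c pre.length) _ c (pre.length + 1) = _
    -- relate one aStep to B's off'
    set ndiff := |last - (x + off - 255)| with hnd
    set diff := |last - (x + off)| with hdd
    set pdiff := |last - (x + off + 255)| with hpd
    set dmin := min ndiff (min diff pdiff) with hdm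
    have hstep : ∀ d : Int,
        aStep (pre ++ (x :: rest).map (fun v => v + off)) last c pre.length
          = (if |dmin - diff| > c then
               if ndiff = dmin then pre ++ (x + (off - 255)) :: rest.map (fun v => v + (off - 255))
               else if pdiff = dmin then pre ++ (x + (off + 255)) :: rest.map (fun v => v + (off + 255))
               else pre ++ (x + off) :: rest.map (fun v => v + off)
             else pre ++ (x + off) :: rest.map (fun v => v + off)) := by
      intro _
      simp only [aStep, hget]
      have h1 := aShift_append_cons pre (rest.map (fun v => v + off)) (x + off) (-255)
      have h2 := aShift_append_cons pre (rest.map (fun v => v + off)) (x + off) 255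
      simp only [List.map_cons] at *
      rw [h1, h2]
      split_ifs <;>
        first
        | rfl
        | (simp only [List.map_map, Function.comp_def, List.append_cancel_left_eq,
             List.cons.injEq]
           exact ⟨by ring, List.map_congr_left fun v _ => by ring⟩)
    -- define off' as B does
    by_cases hc : |dmin - diff| > c
    · by_cases hn : ndiff = dmin
      · have := hstep 0
        rw [if_pos hc, if_pos hn] at this
        rw [this]
        have hg2 : (pre ++ (x + (off - 255)) :: rest.map (fun v => v + (off - 255))).getD pre.length 0 = x + (off - 255) :=
          getD_append_cons _ _ _
        rw [hg2]
        have := ih (pre ++ [x + (off - 255)]) (off - 255) (x + (off - 255)) c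
        simp only [List.append_assoc, List.singleton_append, List.length_append,
          List.length_singleton] at this
        rw [this]
        simp only [bLoop]
        rw [if_pos hc, if_pos hn]
      · by_cases hp : pdiff = dmin
        · have := hstep 0
          rw [if_pos hc, if_neg hn, if_pos hp] at this
          rw [this]
          rw [getD_append_cons]
          have := ih (pre ++ [x + (off + 255)]) (off + 255) (x + (off + 255)) c
          simp only [List.append_assoc, List.singleton_append, List.length_append,
            List.length_singleton] at this
          rw [this]
          simp only [bLoop]
          rw [if_pos hc, if_neg hn, if_pos hp]
        · have := hstep 0
          rw [if_pos hc, if_neg hn, if_neg hp] at this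
          rw [this]
          rw [getD_append_cons]
          have := ih (pre ++ [x + off]) off (x + off) c
          simp only [List.append_assoc, List.singleton_append, List.length_append,
            List.length_singleton] at this
          rw [this]
          simp only [bLoop]
          rw [if_pos hc, if_neg hn, if_neg hp]
    · have := hstep 0
      rw [if_neg hc] at this
      rw [this]
      rw [getD_append_cons]
      have := ih (pre ++ [x + off]) off (x + off) c
      simp only [List.append_assoc, List.singleton_append, List.length_append,
        List.length_singleton] at this
      rw [this]
      simp only [bLoop]
      rw [if_neg hc]

-- ===== VERDICT (by name: the statement is the Claim_ definition above) =====
theorem apply_rollover_fix_spec : Claim_equal_apply_rollover_fix := by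
  intro data c _
  unfold Spec_apply_rollover_fix apply_rollover_fix apply_rollover_fix_alt
  by_cases h : data.length ≤ 2
  · simp [h]
  · rw [if_neg h, if_neg h]
    match data with
    | [] => simp at h
    | x :: rest =>
      have := aLoop_eq_bLoop rest [x] 0 x c
      simp only [List.length_singleton, List.singleton_append] at this
      simpa using this
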